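-- pv_equiv track=rewrite | github.com/Anvesh1909/Python-Full-Stack | problem solving/Mathemetics Problems/11.Jumping Numbers.py | jumpingNumber
-- ===== SOURCE A (Python) =====
-- def jumpingNumber(n):
--     while n>9:
--         a = n%10
--         n//=10
--         b = n%10
--         if abs(a-b) != 1:
--             return False
--     return True
-- ===== SOURCE B (Python) =====
-- def jumpingNumber(n):
--     # Idiomatic: scan the decimal string left-to-right instead of peeling digits with %/ //.
--     if n <= 9:
--         return True
--     s = str(n)
--     return all(abs(ord(a) - ord(b)) == 1 for a, b in zip(s, s[1:]))
-- ===== Notes on version B (the rewrite author's own statement) =====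
-- stated objective: idiomatic
-- what changed: B converts the number to its decimal string once and checks all adjacent character pairs left-to-right with zip/all, instead of A's right-to-left modulo/floor-division peel loop with an early return.
import Mathlib
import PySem

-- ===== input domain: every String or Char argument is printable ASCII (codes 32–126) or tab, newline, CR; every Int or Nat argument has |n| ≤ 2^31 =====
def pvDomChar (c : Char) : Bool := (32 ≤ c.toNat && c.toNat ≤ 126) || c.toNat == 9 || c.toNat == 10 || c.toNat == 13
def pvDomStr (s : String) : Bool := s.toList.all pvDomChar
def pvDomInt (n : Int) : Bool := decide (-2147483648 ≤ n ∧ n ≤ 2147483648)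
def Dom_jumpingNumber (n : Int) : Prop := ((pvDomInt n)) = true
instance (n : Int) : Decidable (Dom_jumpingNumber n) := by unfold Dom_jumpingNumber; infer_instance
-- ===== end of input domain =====

-- B scans the decimal-string digits left-to-right (zip/all) instead of A's right-to-left %/// peel loop; same O(d) cost, more idiomatic.


-- ===== PORT A =====
-- while n>9: a = n%10; n //= 10; b = n%10; if abs(a-b) != 1: return False;  return True
def jumpingNumber (n : Int) : Bool :=
  if _h : 9 < n then
    let a := PySem.Int.mod n 10
    let n' := PySem.Int.floordiv n 10
    let b := PySem.Int.mod n' 10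
    if (a - b).natAbs ≠ 1 then false
    else jumpingNumber n'
  else true
termination_by n.toNat
decreasing_by
  rw [PySem.Int.floordiv_eq_ediv_of_pos (by norm_num)]
  omega

-- ===== PORT B =====
-- if n <= 9: return True; s = str(n); return all(abs(ord(a)-ord(b)) == 1 for a, b in zip(s, s[1:]))
def jumpingNumber_alt (n : Int) : Bool :=
  if n ≤ 9 then true
  else
    let cs := PySem.Int.toChars n
    (cs.zip (cs.drop 1)).all (fun p => ((p.1.toNat : Int) - (p.2.toNat : Int)).natAbs == 1)

-- ===== PRECONDITION & SPEC =====
def Spec_jumpingNumber (n : Int) (out : Bool) : Prop := out = jumpingNumber_alt n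
instance (n : Int) (out : Bool) : Decidable (Spec_jumpingNumber n out) := by unfold Spec_jumpingNumber; infer_instance

-- ===== CLAIM (what is proved, stated in full; the proofs are below) =====
def Claim_equal_jumpingNumber : Prop := ∀ (n : Int), Dom_jumpingNumber n → Spec_jumpingNumber n (jumpingNumber n)

-- ===== LEMMAS AND PROOFS =====

-- A's loop on the underlying natural number
def natLoop (m : Nat) : Bool :=
  if 9 < m then
    if (((m % 10 : Nat) : Int) - ((m / 10 % 10 : Nat) : Int)).natAbs ≠ 1 then false
    else natLoop (m / 10)
  else true
termination_by m
decreasing_by omega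

lemma jumpingNumber_eq_natLoop (n : Int) : jumpingNumber n = natLoop n.toNat := by
  by_cases h : 9 < n
  · rw [jumpingNumber]
    simp only [h, dite_true]
    rw [PySem.Int.mod_eq_emod_of_pos (by norm_num), PySem.Int.floordiv_eq_ediv_of_pos (by norm_num),
        PySem.Int.mod_eq_emod_of_pos (by norm_num)]
    rw [natLoop]
    have h9 : 9 < n.toNat := by omega
    simp only [h9, if_true]
    have e1 : n % 10 = ((n.toNat % 10 : Nat) : Int) := by omega
    have e2 : n / 10 % 10 = ((n.toNat / 10 % 10 : Nat) : Int) := by omega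
    have e3 : (n / 10).toNat = n.toNat / 10 := by omega
    rw [e1, e2, jumpingNumber_eq_natLoop (n / 10), e3]
  · rw [jumpingNumber]
    simp only [h, dite_false]
    rw [natLoop]
    have : ¬ 9 < n.toNat := by omega
    simp [this]
termination_by n.toNat
decreasing_by
  omega

-- chain form of B's adjacent-pair check
def chDiff (a b : Char) : Bool := ((a.toNat : Int) - (b.toNat : Int)).natAbs == 1

def chainOK : List Char → Bool
  | [] => true
  | [_] => true
  | a :: b :: t => chDiff a b && chainOK (b :: t)

lemma zip_all_eq_chainOK (cs : List Char) :
    (cs.zip (cs.drop 1)).all (fun p => ((p.1.toNat : Int) - (p.2.toNat : Int)).natAbs == 1) = chainOK cs := by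
  match cs with
  | [] => rfl
  | [a] => rfl
  | a :: b :: t =>
    simp only [List.drop, List.zip, List.zipWith, List.all_cons, chainOK, chDiff]
    rw [← zip_all_eq_chainOK (b :: t)]
    rfl

lemma chainOK_concat (cs : List Char) (c : Char) (h : cs ≠ []) :
    chainOK (cs ++ [c]) = (chainOK cs && chDiff (cs.getLast h) c) := by
  match cs with
  | [a] => simp [chainOK]
  | a :: b :: t =>
    have hne : (b :: t : List Char) ≠ [] := by simp
    simp only [List.cons_append, chainOK]
    rw [show (b :: (t ++ [c])) = (b :: t) ++ [c] from rfl,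
        chainOK_concat (b :: t) c hne, List.getLast_cons hne, Bool.and_assoc]

-- Nat.toDigitsCore: result is independent of sufficient fuel
lemma tdc_fuel (n : Nat) : ∀ (f₁ f₂ : Nat) (ds : List Char), n < f₁ → n < f₂ →
    Nat.toDigitsCore 10 f₁ n ds = Nat.toDigitsCore 10 f₂ n ds := by
  intro f₁ f₂ ds h1 h2
  match f₁, f₂ with
  | g + 1, k + 1 =>
    simp only [Nat.toDigitsCore]
    by_cases hz : n / 10 = 0
    · simp [hz]
    · simp only [hz, if_false]
      have hlt : n / 10 < n := Nat.div_lt_self (by omega) (by norm_num)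
      exact tdc_fuel (n / 10) g k _ (by omega) (by omega)
termination_by n

-- Nat.toDigitsCore: the accumulator is appended at the end
lemma tdc_shift (n : Nat) : ∀ (f : Nat) (ds : List Char), n < f →
    Nat.toDigitsCore 10 f n ds = Nat.toDigitsCore 10 f n [] ++ ds := by
  intro f ds h
  match f with
  | g + 1 =>
    simp only [Nat.toDigitsCore]
    by_cases hz : n / 10 = 0
    · simp [hz]
    · simp only [hz, if_false]
      have hlt : n / 10 < n := Nat.div_lt_self (by omega) (by norm_num)
      rw [tdc_shift (n / 10) g (Nat.digitChar (n % 10) :: ds) (by omega),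
          tdc_shift (n / 10) g [Nat.digitChar (n % 10)] (by omega)]
      simp
termination_by n

lemma toDigits_small (m : Nat) (h : m ≤ 9) : Nat.toDigits 10 m = [Nat.digitChar m] := by
  interval_cases m <;> rfl

lemma toDigits_step (m : Nat) (h : 9 < m) :
    Nat.toDigits 10 m = Nat.toDigits 10 (m / 10) ++ [Nat.digitChar (m % 10)] := by
  have hz : m / 10 ≠ 0 := by omega
  have hlt : m / 10 < m := Nat.div_lt_self (by omega) (by norm_num)
  unfold Nat.toDigits
  conv_lhs => rw [Nat.toDigitsCore]
  simp only [hz, if_false]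
  rw [tdc_fuel (m / 10) m (m / 10 + 1) _ (by omega) (by omega),
      tdc_shift (m / 10) (m / 10 + 1) _ (by omega)]

lemma toDigits_ne_nil (m : Nat) : Nat.toDigits 10 m ≠ [] := by
  by_cases h : 9 < m
  · rw [toDigits_step m h]; simp
  · rw [toDigits_small m (by omega)]; simp

lemma toDigits_getLast? (m : Nat) : (Nat.toDigits 10 m).getLast? = some (Nat.digitChar (m % 10)) := by
  by_cases h : 9 < m
  · rw [toDigits_step m h]
    simp
  · rw [toDigits_small m (by omega), Nat.mod_eq_of_lt (by omega)]
    rfl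

lemma digitChar_toNat (d : Nat) (h : d < 10) : (Nat.digitChar d).toNat = 48 + d := by
  interval_cases d <;> rfl

lemma chDiff_digitChar (a b : Nat) (ha : a < 10) (hb : b < 10) :
    chDiff (Nat.digitChar a) (Nat.digitChar b) = (((a : Int) - (b : Int)).natAbs == 1) := by
  unfold chDiff
  rw [digitChar_toNat a ha, digitChar_toNat b hb]
  congr 1
  omega

lemma chainOK_toDigits (m : Nat) : chainOK (Nat.toDigits 10 m) = natLoop m := by
  by_cases h : 9 < m
  · rw [toDigits_step m h,
        chainOK_concat _ _ (toDigits_ne_nil (m / 10))]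
    have hl : (Nat.toDigits 10 (m / 10)).getLast (toDigits_ne_nil (m / 10)) = Nat.digitChar (m / 10 % 10) := by
      have h1 := toDigits_getLast? (m / 10)
      rw [List.getLast?_eq_some_getLast (toDigits_ne_nil (m / 10))] at h1
      exact Option.some.inj h1
    rw [hl]
    have hlt : m / 10 < m := Nat.div_lt_self (by omega) (by norm_num)
    rw [chainOK_toDigits (m / 10)]
    rw [chDiff_digitChar _ _ (Nat.mod_lt _ (by norm_num)) (Nat.mod_lt _ (by norm_num))]
    conv_rhs => rw [natLoop]
    simp only [h, if_true]
    by_cases hd : (((m % 10 : Nat) : Int) - ((m / 10 % 10 : Nat) : Int)).natAbs = 1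
    · have hb : ((((m / 10 % 10 : Nat) : Int) - ((m % 10 : Nat) : Int)).natAbs == 1) = true := by
        rw [beq_iff_eq]; omega
      simp only [hd, ne_eq, not_true_eq_false, if_false, hb, Bool.and_true]
    · have hb : ((((m / 10 % 10 : Nat) : Int) - ((m % 10 : Nat) : Int)).natAbs == 1) = false := by
        rw [beq_eq_false_iff_ne]; omega
      simp only [hd, ne_eq, not_false_eq_true, if_true, hb, Bool.and_false]
  · rw [toDigits_small m (by omega)]
    rw [natLoop]
    simp [h, chainOK]
termination_by m

lemma alt_eq_natLoop (n : Int) (h : ¬ n ≤ 9) : jumpingNumber_alt n = natLoop n.toNat := by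
  unfold jumpingNumber_alt
  simp only [h, if_false]
  have hnn : ¬ n < 0 := by omega
  rw [show PySem.Int.toChars n = Nat.toDigits 10 n.toNat by
        simp [PySem.Int.toChars, hnn]]
  rw [zip_all_eq_chainOK, chainOK_toDigits]

-- ===== VERDICT (by name: the statement is the Claim_ definition above) =====
theorem jumpingNumber_spec : Claim_equal_jumpingNumber := by
  intro n _
  unfold Spec_jumpingNumber
  by_cases h : n ≤ 9
  · rw [jumpingNumber]
    have : ¬ 9 < n := by omega
    simp only [this, dite_false]
    unfold jumpingNumber_alt
    simp [h]
  · rw [jumpingNumber_eq_natLoop, alt_eq_natLoop n h]
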